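-- pv_equiv track=rewrite | github.com/levi218/ISDetection | src/abstract_analizer.py | unflat_article
-- ===== SOURCE A (Python) =====
-- def unflat_article(sentence_list, sentence_paragraph):
--     article = []
--     for i in range(len(sentence_paragraph)):
--         start = 0
--         end = 0
--         if i!=0:
--             start = sentence_paragraph[i-1]
--         end = sentence_paragraph[i]
--         article.append([s if s!="-" else "" for s in sentence_list[start:end]])
--     return article
-- ===== SOURCE B (Python) =====
-- def unflat_article(sentence_list, sentence_paragraph):
--     # Stage 1: one pass normalizing "-" to "" over the whole list.
--     cleaned = ["" if s == "-" else s for s in sentence_list]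
--     # Stage 2: recursively peel off one paragraph per boundary, carrying the previous boundary.
--     def go(prev, bounds):
--         if not bounds:
--             return []
--         return [cleaned[prev:bounds[0]]] + go(bounds[0], bounds[1:])
--     return go(0, sentence_paragraph)
-- ===== Notes on version B (the rewrite author's own statement) =====
-- stated objective: alternative
-- what changed: Replaces A's single index loop (which re-derives each start from sentence_paragraph[i-1] and maps '-' inside every slice) by two stages: one whole-list normalization pass, then a recursion over the boundary list carrying the previous boundary as an accumulator.
import Mathlib
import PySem

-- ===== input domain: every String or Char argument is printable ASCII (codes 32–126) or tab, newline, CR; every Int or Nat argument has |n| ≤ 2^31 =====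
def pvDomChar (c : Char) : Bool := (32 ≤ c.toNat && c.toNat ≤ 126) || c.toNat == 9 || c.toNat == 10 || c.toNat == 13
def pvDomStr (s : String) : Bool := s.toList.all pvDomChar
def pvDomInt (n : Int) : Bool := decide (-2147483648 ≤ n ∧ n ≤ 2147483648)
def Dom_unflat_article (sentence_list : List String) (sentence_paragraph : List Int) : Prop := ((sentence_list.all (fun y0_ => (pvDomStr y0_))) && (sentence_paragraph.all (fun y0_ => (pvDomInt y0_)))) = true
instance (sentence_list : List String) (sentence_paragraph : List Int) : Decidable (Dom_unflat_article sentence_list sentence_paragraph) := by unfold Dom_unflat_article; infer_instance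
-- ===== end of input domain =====

-- B replaces A's index loop (branch-computed start bound, '-' mapped inside each slice) by two
-- stages: one whole-list '-'→'' normalization pass, then a recursion over the boundary list
-- carrying the previous boundary: a different decomposition, same cost.

-- ===== PORT A =====
def unflat_article (sentence_list : List String) (sentence_paragraph : List Int) : List (List String) :=
  (PySem.List.pyRange 0 (PySem.List.len sentence_paragraph)).foldl
    (fun article i =>
      let start : Int := if i != 0 then PySem.List.pyGetD sentence_paragraph (i - 1) 0 else 0
      let stop : Int := PySem.List.pyGetD sentence_paragraph i 0
      article ++
        [(PySem.List.slice sentence_list (some start) (some stop)).map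
          (fun s => if s != "-" then s else "")]) []

-- ===== PORT B =====
def unflat_article_alt_go (cleaned : List String) (prev : Int) : List Int → List (List String)
  | [] => []
  | b :: bs => PySem.List.slice cleaned (some prev) (some b) :: unflat_article_alt_go cleaned b bs

def unflat_article_alt (sentence_list : List String) (sentence_paragraph : List Int) : List (List String) :=
  let cleaned := sentence_list.map (fun s => if s == "-" then "" else s)
  unflat_article_alt_go cleaned 0 sentence_paragraph

-- ===== PRECONDITION & SPEC =====
def Spec_unflat_article (sentence_list : List String) (sentence_paragraph : List Int) (out : List (List String)) : Prop := out = unflat_article_alt sentence_list sentence_paragraph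
instance (sentence_list : List String) (sentence_paragraph : List Int) (out : List (List String)) : Decidable (Spec_unflat_article sentence_list sentence_paragraph out) := by unfold Spec_unflat_article; infer_instance

-- ===== CLAIM (what is proved, stated in full; the proofs are below) =====
def Claim_equal_unflat_article : Prop := ∀ (sentence_list : List String) (sentence_paragraph : List Int), Dom_unflat_article sentence_list sentence_paragraph → Spec_unflat_article sentence_list sentence_paragraph (unflat_article sentence_list sentence_paragraph)

-- ===== LEMMAS AND PROOFS =====

-- slicing commutes with mapping (clampIdx only depends on the length, which map preserves)
lemma slice_map (f : String → String) (xs : List String) (a b : Int) :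
    PySem.List.slice (xs.map f) (some a) (some b)
      = (PySem.List.slice xs (some a) (some b)).map f := by
  simp [PySem.List.slice, PySem.List.clampIdx]

-- B's recursion equals the map over explicit (prev, b) boundary pairs
lemma go_eq_zip (cleaned : List String) (prev : Int) (bs : List Int) :
    unflat_article_alt_go cleaned prev bs
      = (List.zip (prev :: bs) bs).map
          (fun p => PySem.List.slice cleaned (some p.1) (some p.2)) := by
  induction bs generalizing prev with
  | nil => rfl
  | cons b bs ih => simp [unflat_article_alt_go, ih]

lemma unflat_eq (sentence_list : List String) (sentence_paragraph : List Int) :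
    unflat_article sentence_list sentence_paragraph
      = unflat_article_alt sentence_list sentence_paragraph := by
  unfold unflat_article unflat_article_alt
  rw [PySem.List.len_eq, PySem.List.pyRange_zero_natCast,
      PySem.List.foldl_append_singleton_eq_map, List.map_map,
      go_eq_zip]
  simp only [List.nil_append]
  apply List.ext_getElem
  · simp
  · intro k h1 h2
    simp only [List.getElem_map, List.getElem_range, Function.comp_apply,
      List.getElem_zip, List.length_map, List.length_range] at h1 ⊢
    have hk : k < sentence_paragraph.length := h1
    rw [slice_map]
    cases k with
    | zero =>
        have e0 : PySem.List.pyGetD sentence_paragraph 0 0 = sentence_paragraph[0] := by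
          rw [show (0 : Int) = ((0 : Nat) : Int) by simp, PySem.List.pyGetD_natCast]
          simp [List.getD_eq_getElem?_getD, List.getElem?_eq_getElem hk]
        simp [e0]
    | succ j =>
        have hne : ((j : Int) + 1) ≠ 0 := by positivity
        have e1 : PySem.List.pyGetD sentence_paragraph ((j : Int) + 1) 0
            = sentence_paragraph[j + 1] := by
          rw [show ((j : Int) + 1) = ((j + 1 : Nat) : Int) by push_cast; ring,
            PySem.List.pyGetD_natCast]
          simp [List.getD_eq_getElem?_getD, List.getElem?_eq_getElem hk]
        have hj : j < sentence_paragraph.length := Nat.lt_of_succ_lt hk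
        simp [hne, e1, List.getElem?_eq_getElem hj]

-- ===== VERDICT (by name: the statement is the Claim_ definition above) =====
theorem unflat_article_spec : Claim_equal_unflat_article := by
  intro sl sp _
  unfold Spec_unflat_article
  exact unflat_eq sl sp
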